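-- pv_equiv track=rewrite | github.com/enohrusu/ai-architect | layout_engine.py | classify_room_groups
-- ===== SOURCE A (Python) =====
-- def classify_room_groups(room_program):
--     day_zone = []
--     night_zone = []
--     service_zone = []
--
--     for room in room_program:
--         rt = room["type"]
--         if rt in ["living_room", "kitchen"]:
--             day_zone.append(room)
--         elif rt in ["master_bedroom", "secondary_bedroom"]:
--             night_zone.append(room)
--         else:
--             service_zone.append(room)
--
--     return {
--         "day_zone": day_zone,
--         "night_zone": night_zone,
--         "service_zone": service_zone,
--     }
-- ===== SOURCE B (Python) =====
-- DAY_TYPES = {"living_room", "kitchen"}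
-- NIGHT_TYPES = {"master_bedroom", "secondary_bedroom"}
--
--
-- def classify_room_groups(room_program):
--     return {
--         "day_zone": [r for r in room_program if r["type"] in DAY_TYPES],
--         "night_zone": [r for r in room_program if r["type"] in NIGHT_TYPES],
--         "service_zone": [
--             r
--             for r in room_program
--             if r["type"] not in DAY_TYPES and r["type"] not in NIGHT_TYPES
--         ],
--     }
-- ===== Notes on version B (the rewrite author's own statement) =====
-- stated objective: idiomatic
-- what changed: Replaces the single classify-and-append loop over three mutable accumulators by three independent list-comprehension filters (day/night membership sets, service = complement), returned directly in the result dict.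
import Mathlib
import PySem

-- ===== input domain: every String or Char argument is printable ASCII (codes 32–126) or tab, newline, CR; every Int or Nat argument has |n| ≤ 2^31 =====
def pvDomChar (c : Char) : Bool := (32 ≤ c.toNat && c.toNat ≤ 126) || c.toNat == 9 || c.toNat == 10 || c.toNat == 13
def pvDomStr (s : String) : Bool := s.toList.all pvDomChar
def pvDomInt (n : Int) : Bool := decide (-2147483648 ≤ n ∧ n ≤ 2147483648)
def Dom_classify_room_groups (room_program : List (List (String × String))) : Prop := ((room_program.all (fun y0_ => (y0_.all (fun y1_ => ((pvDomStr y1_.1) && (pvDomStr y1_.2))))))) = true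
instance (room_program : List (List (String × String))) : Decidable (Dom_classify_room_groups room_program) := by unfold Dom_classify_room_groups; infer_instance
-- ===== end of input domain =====

-- B replaces A's single classify-and-append loop by three independent membership filters (idiomatic decomposition; same O(n) cost).


-- ===== PORT A =====
-- room["type"] (first-match association-list lookup; Pre_ guarantees the key is present, so getD "" is never reached on admitted inputs)
def pvRoomType (room : List (String × String)) : String :=
  ((PySem.Dict.mk room).get? "type").getD ""

def classify_room_groups (room_program : List (List (String × String))) : List (String × List (List (String × String))) :=
  let t := room_program.foldl
    (fun (acc : List (List (String × String)) × List (List (String × String)) × List (List (String × String))) room =>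
      let rt := pvRoomType room
      if (["living_room", "kitchen"] : List String).contains rt then
        (acc.1 ++ [room], acc.2.1, acc.2.2)
      else if (["master_bedroom", "secondary_bedroom"] : List String).contains rt then
        (acc.1, acc.2.1 ++ [room], acc.2.2)
      else
        (acc.1, acc.2.1, acc.2.2 ++ [room]))
    ([], [], [])
  [("day_zone", t.1), ("night_zone", t.2.1), ("service_zone", t.2.2)]

-- ===== PORT B =====
def pvDayTypes : List String := ["living_room", "kitchen"]
def pvNightTypes : List String := ["master_bedroom", "secondary_bedroom"]

def classify_room_groups_alt (room_program : List (List (String × String))) : List (String × List (List (String × String))) :=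
  [("day_zone", room_program.filter (fun r => pvDayTypes.contains (pvRoomType r))),
   ("night_zone", room_program.filter (fun r => pvNightTypes.contains (pvRoomType r))),
   ("service_zone", room_program.filter (fun r =>
      !pvDayTypes.contains (pvRoomType r) && !pvNightTypes.contains (pvRoomType r)))]

-- ===== PRECONDITION & SPEC =====
-- Pre_ excludes rooms without a "type" key, on which Python A raises KeyError (B raises too).
def Pre_classify_room_groups (room_program : List (List (String × String))) : Prop :=
  room_program.all (fun r => r.any (fun p => p.1 == "type")) = true
instance (room_program : List (List (String × String))) : Decidable (Pre_classify_room_groups room_program) := by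
  unfold Pre_classify_room_groups; infer_instance

def pvWitness_classify_room_groups : (List (List (String × String))) :=
  [[("type", "kitchen")], [("type", "garage"), ("area", "12")]]

def Spec_classify_room_groups (room_program : List (List (String × String))) (out : List (String × List (List (String × String)))) : Prop := out = classify_room_groups_alt room_program
instance (room_program : List (List (String × String))) (out : List (String × List (List (String × String)))) : Decidable (Spec_classify_room_groups room_program out) := by unfold Spec_classify_room_groups; infer_instance

-- ===== CLAIM (what is proved, stated in full; the proofs are below) =====
def Claim_equal_classify_room_groups : Prop := ∀ (room_program : List (List (String × String))), Dom_classify_room_groups room_program → Pre_classify_room_groups room_program → Spec_classify_room_groups room_program (classify_room_groups room_program)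

-- ===== LEMMAS AND PROOFS =====
-- Day and night type lists are disjoint, so a room in A's first branch never passes B's night filter.
theorem pv_disj (s : String)
    (h : (["living_room", "kitchen"] : List String).contains s = true) :
    (["master_bedroom", "secondary_bedroom"] : List String).contains s = false := by
  simp only [List.contains_cons, List.contains_nil, Bool.or_false, Bool.or_eq_true,
    beq_iff_eq] at h ⊢
  rcases h with h | h <;> subst h <;> decide

-- Loop invariant for A's fold: the three accumulators are the three filters of the prefix seen so far.
theorem pv_fold_inv (l : List (List (String × String)))
    (dz nz sz : List (List (String × String))) :
    l.foldl
      (fun (acc : List (List (String × String)) × List (List (String × String)) × List (List (String × String))) room =>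
        let rt := pvRoomType room
        if (["living_room", "kitchen"] : List String).contains rt then
          (acc.1 ++ [room], acc.2.1, acc.2.2)
        else if (["master_bedroom", "secondary_bedroom"] : List String).contains rt then
          (acc.1, acc.2.1 ++ [room], acc.2.2)
        else
          (acc.1, acc.2.1, acc.2.2 ++ [room]))
      (dz, nz, sz)
    = (dz ++ l.filter (fun r => pvDayTypes.contains (pvRoomType r)),
       nz ++ l.filter (fun r => pvNightTypes.contains (pvRoomType r)),
       sz ++ l.filter (fun r =>
         !pvDayTypes.contains (pvRoomType r) && !pvNightTypes.contains (pvRoomType r))) := by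
  induction l generalizing dz nz sz with
  | nil => simp
  | cons room rest ih =>
    simp only [List.foldl_cons, List.filter_cons]
    cases hd : (["living_room", "kitchen"] : List String).contains (pvRoomType room) with
    | true =>
      have hn := pv_disj (pvRoomType room) hd
      simp only [pvDayTypes, pvNightTypes, hd, hn, if_true, Bool.false_eq_true, if_false,
        Bool.not_false, Bool.not_true, Bool.false_and, ih]
      simp
    | false =>
      cases hn : (["master_bedroom", "secondary_bedroom"] : List String).contains (pvRoomType room) with
      | true =>
        simp only [pvDayTypes, pvNightTypes, hd, hn, if_true, Bool.false_eq_true, if_false,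
          Bool.not_false, Bool.not_true, Bool.true_and, ih]
        simp
      | false =>
        simp only [pvDayTypes, pvNightTypes, hd, hn, Bool.false_eq_true, if_false,
          Bool.not_false, Bool.and_self, if_true, ih]
        simp

-- ===== VERDICT (by name: the statement is the Claim_ definition above) =====
theorem classify_room_groups_spec : Claim_equal_classify_room_groups := by
  intro rp _ _
  unfold Spec_classify_room_groups classify_room_groups classify_room_groups_alt
  simp only [pv_fold_inv, List.nil_append]
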